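-- pv_equiv track=rewrite | github.com/hugoms154/codes | Jogo da Memoria.py | mesclaMapaArray
-- ===== SOURCE A (Python) =====
-- def mesclaMapaArray(mapaArray, maskArray, jogada):
--     maptext = ""
--     for l in range(len(maskArray)):
--         for c in range(len(maskArray[l])):
--             if (l == jogada[0] and c == jogada[1]):
--                 maptext += "{}\t".format(mapaArray[l][c]).expandtabs(4)
--             elif(l == jogada[2] and c == jogada[3]):
--                 maptext += "{}\t".format(mapaArray[l][c]).expandtabs(4)
--             else:
--                 maptext += "*\t".expandtabs(4)
--         maptext += "\n"
--     return maptext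
-- ===== SOURCE B (Python) =====
-- def mesclaMapaArray(mapaArray, maskArray, jogada):
--     star = "*\t".expandtabs(4)
--     grid = [[star] * len(row) for row in maskArray]
--     for r, c in ((jogada[0], jogada[1]), (jogada[2], jogada[3])):
--         if 0 <= r < len(maskArray) and 0 <= c < len(maskArray[r]):
--             grid[r][c] = "{}\t".format(mapaArray[r][c]).expandtabs(4)
--     return "".join("".join(row) + "\n" for row in grid)
-- ===== Notes on version B (the rewrite author's own statement) =====
-- stated objective: simpler
-- what changed: Replaces the per-cell three-way conditional scan and quadratic string += accumulation by fill-then-patch: build a grid of masked cells, overwrite the two played in-bounds positions, then ''.join the rows (the join instead of repeated += is the constant-factor speed mechanism).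
-- outside the precondition, e.g. on mesclaMapaArray([], [], []): A returns '', B raises IndexError
import Mathlib
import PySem

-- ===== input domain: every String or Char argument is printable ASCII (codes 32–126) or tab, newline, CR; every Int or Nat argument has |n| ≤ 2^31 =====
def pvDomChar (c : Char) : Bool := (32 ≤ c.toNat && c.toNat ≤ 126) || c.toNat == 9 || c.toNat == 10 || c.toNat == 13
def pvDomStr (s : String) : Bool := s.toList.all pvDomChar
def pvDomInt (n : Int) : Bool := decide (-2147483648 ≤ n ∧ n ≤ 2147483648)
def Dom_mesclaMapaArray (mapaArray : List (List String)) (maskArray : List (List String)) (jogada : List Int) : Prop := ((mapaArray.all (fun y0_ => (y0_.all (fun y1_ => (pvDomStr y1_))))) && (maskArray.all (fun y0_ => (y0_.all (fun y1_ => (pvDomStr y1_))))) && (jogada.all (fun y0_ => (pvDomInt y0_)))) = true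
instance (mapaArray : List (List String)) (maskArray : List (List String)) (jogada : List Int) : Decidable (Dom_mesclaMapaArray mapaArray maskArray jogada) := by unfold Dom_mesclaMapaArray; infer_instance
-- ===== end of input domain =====

-- B builds the fully-masked grid first and then patches the two in-bounds played cells,
-- replacing A's per-cell three-way conditional scan (objective: simpler fill-then-patch decomposition).

-- shared helper: Python's str.expandtabs(4), exact for tab/newline/CR handling
-- (column counter mod 4; '\t' pads to the next multiple of 4, '\n'/'\r' reset the column)
def expandTabs4Aux : List Char → Nat → List Char
  | [], _ => []
  | ch :: rest, col =>
    if ch = '\t' then List.replicate (4 - col % 4) ' ' ++ expandTabs4Aux rest 0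
    else if ch = '\n' ∨ ch = '\r' then ch :: expandTabs4Aux rest 0
    else ch :: expandTabs4Aux rest ((col + 1) % 4)

def expandTabs4 (s : String) : String := String.ofList (expandTabs4Aux s.toList 0)

-- ===== PORT A =====
def mesclaMapaArray (mapaArray : List (List String)) (maskArray : List (List String)) (jogada : List Int) : String :=
  (List.range maskArray.length).foldl (fun (maptext : String) (l : Nat) =>
    ((List.range (maskArray.getD l []).length).foldl (fun (t : String) (c : Nat) =>
      if (l : Int) = jogada.getD 0 (-1) ∧ (c : Int) = jogada.getD 1 (-1) then
        t ++ expandTabs4 ((mapaArray.getD l []).getD c "" ++ "\t")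
      else if (l : Int) = jogada.getD 2 (-1) ∧ (c : Int) = jogada.getD 3 (-1) then
        t ++ expandTabs4 ((mapaArray.getD l []).getD c "" ++ "\t")
      else
        t ++ expandTabs4 "*\t") maptext) ++ "\n") ""

-- ===== PORT B =====
-- "".join, ported by hand
def concatAll : List String → String
  | [] => ""
  | s :: rest => s ++ concatAll rest

-- one guarded overwrite of grid cell (r,c), as in Source B's patch loop body
def patchCell (mapaArray : List (List String)) (maskArray : List (List String))
    (g : List (List String)) (r c : Int) : List (List String) :=
  if 0 ≤ r ∧ r < (maskArray.length : Int) ∧ 0 ≤ c ∧ c < ((maskArray.getD r.toNat []).length : Int) then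
    g.set r.toNat ((g.getD r.toNat []).set c.toNat
      (expandTabs4 ((mapaArray.getD r.toNat []).getD c.toNat "" ++ "\t")))
  else g

def mesclaMapaArray_alt (mapaArray : List (List String)) (maskArray : List (List String)) (jogada : List Int) : String :=
  concatAll ((patchCell mapaArray maskArray
      (patchCell mapaArray maskArray
        (maskArray.map (fun row => List.replicate row.length (expandTabs4 "*\t")))
        (jogada.getD 0 (-1)) (jogada.getD 1 (-1)))
      (jogada.getD 2 (-1)) (jogada.getD 3 (-1))).map (fun row => concatAll row ++ "\n"))

-- ===== PRECONDITION & SPEC =====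
-- if play (r,c) falls inside the mask grid's shape, mapaArray must cover that cell (else A raises IndexError)
def PlayOK (mapaArray : List (List String)) (maskArray : List (List String)) (r c : Int) : Prop :=
  (0 ≤ r ∧ 0 ≤ c ∧ r.toNat < maskArray.length ∧ c.toNat < (maskArray.getD r.toNat []).length) →
  (r.toNat < mapaArray.length ∧ c.toNat < (mapaArray.getD r.toNat []).length)

-- Pre_ excludes: jogada with fewer than 4 entries (A and B raise IndexError there, except on
-- degenerate grids with no cell, where A returns but B still raises), and plays that hit a mask
-- cell not covered by mapaArray (A raises IndexError).
def Pre_mesclaMapaArray (mapaArray : List (List String)) (maskArray : List (List String)) (jogada : List Int) : Prop :=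
  4 ≤ jogada.length ∧
  PlayOK mapaArray maskArray (jogada.getD 0 (-1)) (jogada.getD 1 (-1)) ∧
  PlayOK mapaArray maskArray (jogada.getD 2 (-1)) (jogada.getD 3 (-1))

instance (mapaArray : List (List String)) (maskArray : List (List String)) (jogada : List Int) : Decidable (Pre_mesclaMapaArray mapaArray maskArray jogada) := by
  unfold Pre_mesclaMapaArray PlayOK; infer_instance

def pvWitness_mesclaMapaArray : List (List String) × List (List String) × List Int :=
  ([["a", "b"], ["c", "d"]], [["*", "*"], ["*", "*"]], [0, 1, 1, 0])

def Spec_mesclaMapaArray (mapaArray : List (List String)) (maskArray : List (List String)) (jogada : List Int) (out : String) : Prop := out = mesclaMapaArray_alt mapaArray maskArray jogada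
instance (mapaArray : List (List String)) (maskArray : List (List String)) (jogada : List Int) (out : String) : Decidable (Spec_mesclaMapaArray mapaArray maskArray jogada out) := by unfold Spec_mesclaMapaArray; infer_instance

-- ===== CLAIM (what is proved, stated in full; the proofs are below) =====
def Claim_equal_mesclaMapaArray : Prop := ∀ (mapaArray : List (List String)) (maskArray : List (List String)) (jogada : List Int), Dom_mesclaMapaArray mapaArray maskArray jogada → Pre_mesclaMapaArray mapaArray maskArray jogada → Spec_mesclaMapaArray mapaArray maskArray jogada (mesclaMapaArray mapaArray maskArray jogada)

-- ===== LEMMAS AND PROOFS =====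

-- the played-cell value at position (l, c)
def vCell (mapaArray : List (List String)) (l c : Nat) : String :=
  expandTabs4 ((mapaArray.getD l []).getD c "" ++ "\t")

-- what A writes for cell (l, c)
def cellA (mapaArray : List (List String)) (jogada : List Int) (l c : Nat) : String :=
  if (l : Int) = jogada.getD 0 (-1) ∧ (c : Int) = jogada.getD 1 (-1) then vCell mapaArray l c
  else if (l : Int) = jogada.getD 2 (-1) ∧ (c : Int) = jogada.getD 3 (-1) then vCell mapaArray l c
  else expandTabs4 "*\t"

-- what B's patched grid holds at cell (l, c) (second patch wins)
def cellB (mapaArray : List (List String)) (jogada : List Int) (l c : Nat) : String :=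
  if (l : Int) = jogada.getD 2 (-1) ∧ (c : Int) = jogada.getD 3 (-1) then vCell mapaArray l c
  else if (l : Int) = jogada.getD 0 (-1) ∧ (c : Int) = jogada.getD 1 (-1) then vCell mapaArray l c
  else expandTabs4 "*\t"

-- the tabulated grid with cell function f
def tabGrid (maskArray : List (List String)) (f : Nat → Nat → String) : List (List String) :=
  (List.range maskArray.length).map (fun l =>
    (List.range (maskArray.getD l []).length).map (f l))

theorem foldl_append_concat {α : Type} (f : α → String) :
    ∀ (xs : List α) (init : String),
      xs.foldl (fun a x => a ++ f x) init = init ++ concatAll (xs.map f) := by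
  intro xs
  induction xs with
  | nil => intro init; simp [concatAll]
  | cons x rest ih =>
      intro init
      simp only [List.foldl_cons, List.map_cons, concatAll, ih, String.append_assoc]

theorem A_eq (mapaArray maskArray : List (List String)) (jogada : List Int) :
    mesclaMapaArray mapaArray maskArray jogada =
      concatAll ((List.range maskArray.length).map (fun l =>
        concatAll ((List.range (maskArray.getD l []).length).map (cellA mapaArray jogada l)) ++ "\n")) := by
  unfold mesclaMapaArray
  have hinner : ∀ (l : Nat), (fun (t : String) (c : Nat) =>
      if (l : Int) = jogada.getD 0 (-1) ∧ (c : Int) = jogada.getD 1 (-1) then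
        t ++ expandTabs4 ((mapaArray.getD l []).getD c "" ++ "\t")
      else if (l : Int) = jogada.getD 2 (-1) ∧ (c : Int) = jogada.getD 3 (-1) then
        t ++ expandTabs4 ((mapaArray.getD l []).getD c "" ++ "\t")
      else t ++ expandTabs4 "*\t") = fun t c => t ++ cellA mapaArray jogada l c := by
    intro l; funext t c
    simp only [cellA, vCell]
    split_ifs <;> rfl
  have houter : (fun (maptext : String) (l : Nat) =>
      ((List.range (maskArray.getD l []).length).foldl (fun (t : String) (c : Nat) =>
        if (l : Int) = jogada.getD 0 (-1) ∧ (c : Int) = jogada.getD 1 (-1) then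
          t ++ expandTabs4 ((mapaArray.getD l []).getD c "" ++ "\t")
        else if (l : Int) = jogada.getD 2 (-1) ∧ (c : Int) = jogada.getD 3 (-1) then
          t ++ expandTabs4 ((mapaArray.getD l []).getD c "" ++ "\t")
        else t ++ expandTabs4 "*\t") maptext) ++ "\n") =
      fun maptext l => maptext ++
        (concatAll ((List.range (maskArray.getD l []).length).map (cellA mapaArray jogada l)) ++ "\n") := by
    funext maptext l
    rw [hinner l, foldl_append_concat, String.append_assoc]
  rw [houter, foldl_append_concat]
  simp

theorem set_map_range {α : Type} (n i : Nat) (f : Nat → α) (v : α) (_h : i < n) :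
    ((List.range n).map f).set i v = (List.range n).map (fun j => if i = j then v else f j) := by
  apply List.ext_getElem
  · simp
  · intro j h1 h2
    simp only [List.length_set, List.length_map, List.length_range] at h1
    rw [List.getElem_set]
    simp [List.getElem_map, List.getElem_range]

-- patching a tabulated grid yields a tabulated grid (guard false ⇒ the new cell condition never fires)
theorem patch_tab (mapaArray maskArray : List (List String)) (f : Nat → Nat → String) (r c : Int) :
    patchCell mapaArray maskArray (tabGrid maskArray f) r c =
      tabGrid maskArray (fun l cc =>
        if (l : Int) = r ∧ (cc : Int) = c then vCell mapaArray l cc else f l cc) := by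
  unfold patchCell tabGrid
  split_ifs with hb
  · obtain ⟨hr0, hrn, hc0, hcn⟩ := hb
    have hrlt : r.toNat < maskArray.length := by omega
    have hclt : c.toNat < (maskArray.getD r.toNat []).length := by omega
    have hget : ((List.range maskArray.length).map (fun l =>
        (List.range (maskArray.getD l []).length).map (f l))).getD r.toNat [] =
        (List.range (maskArray.getD r.toNat []).length).map (f r.toNat) := by
      rw [List.getD_eq_getElem _ _ (by simpa using hrlt)]
      simp [List.getElem_map, List.getElem_range]
    rw [hget, set_map_range _ _ _ _ hclt, set_map_range _ _ _ _ hrlt]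
    apply List.map_congr_left
    intro l hl
    rw [List.mem_range] at hl
    by_cases hlr : r.toNat = l
    · subst hlr
      rw [if_pos rfl]
      apply List.map_congr_left
      intro cc hcc
      rw [List.mem_range] at hcc
      have hlr' : ((r.toNat : Nat) : Int) = r := by omega
      by_cases hcc' : c.toNat = cc
      · have h2 : (cc : Int) = c := by omega
        simp [hlr', h2, hcc', vCell]
      · have h2 : ¬ ((cc : Int) = c) := by omega
        simp [hlr', h2, hcc']
    · have : ¬ ((l : Int) = r) := by omega
      simp [hlr, this]
  · apply List.map_congr_left
    intro l hl
    rw [List.mem_range] at hl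
    apply List.map_congr_left
    intro cc hcc
    rw [List.mem_range] at hcc
    have : ¬ ((l : Int) = r ∧ (cc : Int) = c) := by
      rintro ⟨h1, h2⟩
      apply hb
      refine ⟨by omega, by omega, by omega, ?_⟩
      have : r.toNat = l := by omega
      rw [this]
      omega
    simp [this]

theorem B_eq (mapaArray maskArray : List (List String)) (jogada : List Int) :
    mesclaMapaArray_alt mapaArray maskArray jogada =
      concatAll ((tabGrid maskArray (cellB mapaArray jogada)).map (fun row => concatAll row ++ "\n")) := by
  unfold mesclaMapaArray_alt
  have hgrid0 : maskArray.map (fun row => List.replicate row.length (expandTabs4 "*\t")) =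
      tabGrid maskArray (fun _ _ => expandTabs4 "*\t") := by
    unfold tabGrid
    apply List.ext_getElem
    · simp
    · intro l h1 h2
      simp only [List.length_map] at h1
      simp [List.getElem_map, List.getElem_range, List.getD, List.getElem?_eq_getElem h1,
        List.map_const']
  rw [hgrid0, patch_tab, patch_tab]
  congr 1

theorem cell_agree (mapaArray : List (List String)) (jogada : List Int) (l c : Nat) :
    cellA mapaArray jogada l c = cellB mapaArray jogada l c := by
  unfold cellA cellB
  split_ifs <;> rfl

-- ===== VERDICT (by name: the statement is the Claim_ definition above) =====
theorem mesclaMapaArray_spec : Claim_equal_mesclaMapaArray := by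
  intro mapaArray maskArray jogada _hdom _hpre
  unfold Spec_mesclaMapaArray
  rw [A_eq, B_eq]
  congr 1
  unfold tabGrid
  rw [List.map_map]
  apply List.map_congr_left
  intro l _
  simp only [Function.comp]
  congr 1
  congr 1
  apply List.map_congr_left
  intro c _
  exact cell_agree mapaArray jogada l c
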